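-- pv_equiv track=rewrite | github.com/goodwordalchemy/coding_competitions | kickstartA2020/workout.py | workout_k_is_1
-- ===== SOURCE A (Python) =====
-- import heapq
--
-- def workout_k_is_1(k, sessions):
--     N = len(sessions)
--     diffs = []
--     for i in range(1, N):
--         diffs.append(-(sessions[i]-sessions[i-1]))
--
--     heapq.heapify(diffs)
--     max_diff = -heapq.heappop(diffs)
--     divided = max_diff // 2
--
--     return max([
--         divided,
--         max_diff - divided,
--         -heapq.heappop(diffs) if diffs else 0,
--     ])
-- ===== SOURCE B (Python) =====
-- def workout_k_is_1(k, sessions):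
--     diffs = [b - a for a, b in zip(sessions, sessions[1:])]
--     if len(diffs) == 1:
--         best, second = diffs[0], 0
--     else:
--         best, second = diffs[0], diffs[1]
--         if best < second:
--             best, second = second, best
--         for d in diffs[2:]:
--             if d > best:
--                 best, second = d, best
--             elif d > second:
--                 second = d
--     return max(best - best // 2, second)
-- ===== Notes on version B (the rewrite author's own statement) =====
-- stated objective: simpler
-- what changed: Replaces the heap (negate all gaps, heapify, pop twice) by a single linear pass that tracks the largest and second-largest consecutive difference directly, returning max(best - best//2, second).
import Mathlib
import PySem

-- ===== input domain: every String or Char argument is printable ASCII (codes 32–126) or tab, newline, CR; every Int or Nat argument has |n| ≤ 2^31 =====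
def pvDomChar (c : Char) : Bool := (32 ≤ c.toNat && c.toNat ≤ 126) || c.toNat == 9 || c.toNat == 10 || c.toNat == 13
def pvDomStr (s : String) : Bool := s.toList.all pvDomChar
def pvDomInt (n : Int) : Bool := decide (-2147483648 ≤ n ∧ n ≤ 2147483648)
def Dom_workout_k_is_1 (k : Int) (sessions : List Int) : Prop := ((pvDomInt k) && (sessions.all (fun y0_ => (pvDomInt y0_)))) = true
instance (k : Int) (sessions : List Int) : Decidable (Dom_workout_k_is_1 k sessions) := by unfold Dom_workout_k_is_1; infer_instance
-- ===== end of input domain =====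

-- B replaces A's heap (heapify + two pops) by one linear pass keeping the largest and
-- second-largest consecutive difference (objective: simpler, no heap machinery).

-- ===== PORT A =====
-- heapq.heapify builds a min-heap of the list's values; heappop removes and returns the
-- minimum VALUE, leaving the remaining multiset. Only values are used afterwards, so this
-- is modeled exactly by min? (the minimum value) and List.erase (drop one occurrence of it).
def workout_k_is_1 (k : Int) (sessions : List Int) : Int :=
  let N : Int := (sessions.length : Int)
  let diffs : List Int :=
    (PySem.List.pyRange 1 N 1).foldl
      (fun acc i => acc ++ [-(PySem.List.pyGetD sessions i 0 - PySem.List.pyGetD sessions (i-1) 0)]) []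
  match PySem.List.min? diffs (fun x => x) with
  | none => 0   -- heappop of an empty heap: Python raises IndexError; excluded by Pre_
  | some m =>
    let max_diff := -m
    let divided := PySem.Int.floordiv max_diff 2
    -- max([a, b, c]) written as nested binary max
    max divided (max (max_diff - divided)
      (match PySem.List.min? (diffs.erase m) (fun x => x) with
       | none => 0          -- `if diffs else 0` branch: heap empty after the first pop
       | some m2 => -m2))

-- ===== PORT B =====
-- single pass over diffs[2:] keeping (best, second)
def altLoop (best second : Int) (ds : List Int) : Int × Int :=
  match ds with
  | [] => (best, second)
  | d :: ds =>
    if d > best then altLoop d best ds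
    else if d > second then altLoop best d ds
    else altLoop best second ds

def workout_k_is_1_alt (k : Int) (sessions : List Int) : Int :=
  let diffs : List Int :=
    (sessions.zip (PySem.List.slice sessions (some 1) none)).map (fun p => p.2 - p.1)
  match diffs with
  | [] => 0   -- diffs[0] raises IndexError in Python; excluded by Pre_
  | [d] => max (d - PySem.Int.floordiv d 2) 0
  | d0 :: d1 :: rest =>
    let bs := if d0 < d1 then (d1, d0) else (d0, d1)
    let r := altLoop bs.1 bs.2 rest
    max (r.1 - PySem.Int.floordiv r.1 2) r.2

-- ===== PRECONDITION & SPEC =====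
-- Python A raises IndexError (heappop of an empty heap) when len(sessions) <= 1; B raises there too.
def Pre_workout_k_is_1 (k : Int) (sessions : List Int) : Prop := 2 ≤ sessions.length
instance (k : Int) (sessions : List Int) : Decidable (Pre_workout_k_is_1 k sessions) := by unfold Pre_workout_k_is_1; infer_instance
def pvWitness_workout_k_is_1 : Int × List Int := (1, [0, 3, 5])

def Spec_workout_k_is_1 (k : Int) (sessions : List Int) (out : Int) : Prop := out = workout_k_is_1_alt k sessions
instance (k : Int) (sessions : List Int) (out : Int) : Decidable (Spec_workout_k_is_1 k sessions out) := by unfold Spec_workout_k_is_1; infer_instance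

-- ===== CLAIM (what is proved, stated in full; the proofs are below) =====
def Claim_equal_workout_k_is_1 : Prop := ∀ (k : Int) (sessions : List Int), Dom_workout_k_is_1 k sessions → Pre_workout_k_is_1 k sessions → Spec_workout_k_is_1 k sessions (workout_k_is_1 k sessions)

-- ===== LEMMAS AND PROOFS =====

-- A's (negated) diff list is the pointwise negation of B's diff list.
lemma diffs_rel (l : List Int) :
    ((PySem.List.pyRange 1 (l.length : Int) 1).foldl
      (fun acc i => acc ++ [-(PySem.List.pyGetD l i 0 - PySem.List.pyGetD l (i-1) 0)]) [])
    = ((l.zip (PySem.List.slice l (some 1) none)).map (fun p => p.2 - p.1)).map (fun x => -x) := by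
  rw [PySem.List.foldl_append_singleton_eq_map, PySem.List.slice_from_one]
  apply List.ext_getElem
  · simp only [List.nil_append, List.length_map, PySem.List.length_pyRange_one,
      List.length_zip, List.length_tail]
    omega
  · intro i h1 h2
    simp only [List.length_map, List.length_zip, List.length_tail] at h2
    have hlen1 : i + 1 < l.length := by omega
    have hlen0 : i < l.length := by omega
    simp only [List.nil_append, List.getElem_map, PySem.List.getElem_pyRange_one,
      List.getElem_zip, List.getElem_tail]
    have e1 : PySem.List.pyGetD l (1 + (i : Int)) 0 = l[i + 1] := by
      rw [show (1 : Int) + (i : Int) = ((i + 1 : Nat) : Int) by push_cast; ring,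
        PySem.List.pyGetD_natCast, List.getD_eq_getElem?_getD,
        List.getElem?_eq_getElem hlen1]
      rfl
    have e2 : PySem.List.pyGetD l (1 + (i : Int) - 1) 0 = l[i] := by
      rw [show (1 : Int) + (i : Int) - 1 = ((i : Nat) : Int) by omega,
        PySem.List.pyGetD_natCast, List.getD_eq_getElem?_getD,
        List.getElem?_eq_getElem hlen0]
      rfl
    rw [e1, e2]

lemma foldl_min_neg (t : List Int) : ∀ x : Int,
    (t.map (fun y => -y)).foldl min (-x) = -(t.foldl max x) := by
  induction t with
  | nil => intro x; simp
  | cons a t ih =>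
    intro x
    simp only [List.map_cons, List.foldl_cons]
    rw [show min (-x) (-a) = -(max x a) by
      rcases le_total x a with h | h <;> simp [min_def, max_def] <;> omega]
    exact ih _

lemma min?_map_neg (l : List Int) :
    PySem.List.min? (l.map (fun y => -y)) (fun x => x)
    = (PySem.List.max? l (fun x => x)).map (fun y => -y) := by
  cases l with
  | nil =>
    rw [List.map_nil,
      show PySem.List.min? ([] : List Int) (fun x => x) = none from
        (PySem.List.min?_eq_none_iff _ _).mpr rfl,
      show PySem.List.max? ([] : List Int) (fun x => x) = none from
        (PySem.List.max?_eq_none_iff _ _).mpr rfl]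
    rfl
  | cons x t =>
    rw [List.map_cons, PySem.List.min?_id_cons, PySem.List.max?_id_cons]
    simp [foldl_min_neg]

-- the value of max(l) is determined by membership + upper bound
lemma max?_val (l : List Int) (m : Int) (hm : m ∈ l) (hmax : ∀ y ∈ l, y ≤ m) :
    PySem.List.max? l (fun x => x) = some m := by
  cases h : PySem.List.max? l (fun x => x) with
  | none =>
    rw [PySem.List.max?_eq_none_iff] at h
    subst h; simp at hm
  | some v =>
    have hv := PySem.List.max?_mem h
    have h2 := PySem.List.max?_isMax h
    have hvm : v ≤ m := hmax v hv
    have hmv : m ≤ v := h2 m hm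
    have : v = m := le_antisymm hvm hmv
    rw [this]

-- loop invariant: altLoop keeps the top two values; everything discarded is ≤ the second
lemma altLoop_spec : ∀ (ds : List Int) (b s : Int) (low : Multiset Int),
    s ≤ b → (∀ x ∈ low, x ≤ s) →
    ∃ low2 : Multiset Int,
      b ::ₘ s ::ₘ (low + (ds : Multiset Int))
        = (altLoop b s ds).1 ::ₘ (altLoop b s ds).2 ::ₘ low2
      ∧ (altLoop b s ds).2 ≤ (altLoop b s ds).1
      ∧ ∀ x ∈ low2, x ≤ (altLoop b s ds).2 := by
  intro ds
  induction ds with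
  | nil =>
    intro b s low hsb hlow
    exact ⟨low, by simp [altLoop], hsb, hlow⟩
  | cons d ds ih =>
    intro b s low hsb hlow
    simp only [altLoop]
    by_cases h1 : d > b
    · simp only [if_pos h1]
      obtain ⟨low2, heq, hle, hlow2⟩ := ih d b (low + {s}) (le_of_lt h1) (by
        intro x hx
        rcases Multiset.mem_add.mp hx with h | h
        · exact le_trans (hlow x h) hsb
        · rw [Multiset.mem_singleton] at h; subst h; exact hsb)
      refine ⟨low2, ?_, hle, hlow2⟩
      rw [← heq]
      simp only [← Multiset.singleton_add]
      abel
    · simp only [if_neg h1]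
      by_cases h2 : d > s
      · simp only [if_pos h2]
        obtain ⟨low2, heq, hle, hlow2⟩ := ih b d (low + {s}) (by omega) (by
          intro x hx
          rcases Multiset.mem_add.mp hx with h | h
          · exact le_trans (hlow x h) (le_of_lt h2)
          · rw [Multiset.mem_singleton] at h; subst h; exact le_of_lt h2)
        refine ⟨low2, ?_, hle, hlow2⟩
        rw [← heq]
        simp only [← Multiset.singleton_add]
        abel
      · simp only [if_neg h2]
        obtain ⟨low2, heq, hle, hlow2⟩ := ih b s (low + {d}) hsb (by
          intro x hx
          rcases Multiset.mem_add.mp hx with h | h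
          · exact hlow x h
          · rw [Multiset.mem_singleton] at h; subst h; omega)
        refine ⟨low2, ?_, hle, hlow2⟩
        rw [← heq]
        simp only [← Multiset.singleton_add]
        abel

-- ===== VERDICT (by name: the statement is the Claim_ definition above) =====
theorem workout_k_is_1_spec : Claim_equal_workout_k_is_1 := by
  intro k sessions _ _
  unfold Spec_workout_k_is_1
  simp only [workout_k_is_1, workout_k_is_1_alt, diffs_rel]
  generalize ((sessions.zip (PySem.List.slice sessions (some 1) none)).map
    (fun p => p.2 - p.1)) = D
  rcases D with _ | ⟨d0, _ | ⟨d1, rest⟩⟩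
  · -- no diffs: both ports return 0
    simp only [List.map_nil,
      show PySem.List.min? ([] : List Int) (fun x => x) = none from
        (PySem.List.min?_eq_none_iff _ _).mpr rfl]
  · -- exactly one diff d0: A's second pop is guarded, defaulting to 0
    simp only [List.map_cons, List.map_nil, PySem.List.min?_id_cons, List.foldl_nil,
      List.erase_cons_head, neg_neg,
      show PySem.List.min? ([] : List Int) (fun x => x) = none from
        (PySem.List.min?_eq_none_iff _ _).mpr rfl]
    simp only [PySem.Int.floordiv_eq_ediv_of_pos (show (0:Int) < 2 by norm_num)]
    have hd : d0 / 2 ≤ d0 - d0 / 2 := by omega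
    simp only [max_def]
    split_ifs <;> omega
  · -- at least two diffs
    by_cases hc : d0 < d1
    · simp only [if_pos hc]
      obtain ⟨low2, heq, hle, hlow2⟩ := altLoop_spec rest d1 d0 0 (by omega) (by simp)
      rw [Multiset.zero_add] at heq
      have hperm : ((d0 :: d1 :: rest : List Int) : Multiset Int)
          = (altLoop d1 d0 rest).1 ::ₘ (altLoop d1 d0 rest).2 ::ₘ low2 := by
        rw [← heq]
        simp only [Multiset.cons_coe]
        exact Multiset.coe_eq_coe.mpr (List.Perm.swap d1 d0 rest)
      have hBmem : (altLoop d1 d0 rest).1 ∈ (d0 :: d1 :: rest : List Int) := by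
        rw [← Multiset.mem_coe, hperm]; exact Multiset.mem_cons_self _ _
      have hBmax : ∀ y ∈ (d0 :: d1 :: rest : List Int), y ≤ (altLoop d1 d0 rest).1 := by
        intro y hy
        have hy' : y ∈ (altLoop d1 d0 rest).1 ::ₘ (altLoop d1 d0 rest).2 ::ₘ low2 := by
          rw [← hperm]; exact Multiset.mem_coe.mpr hy
        rcases Multiset.mem_cons.mp hy' with h | h
        · omega
        · rcases Multiset.mem_cons.mp h with h | h
          · omega
          · exact le_trans (hlow2 y h) hle
      have herase : (((d0 :: d1 :: rest : List Int).erase (altLoop d1 d0 rest).1 : List Int) : Multiset Int)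
          = (altLoop d1 d0 rest).2 ::ₘ low2 := by
        rw [← Multiset.coe_erase, hperm, Multiset.erase_cons_head]
      have hSmem : (altLoop d1 d0 rest).2 ∈ (d0 :: d1 :: rest : List Int).erase (altLoop d1 d0 rest).1 := by
        rw [← Multiset.mem_coe, herase]; exact Multiset.mem_cons_self _ _
      have hSmax : ∀ y ∈ (d0 :: d1 :: rest : List Int).erase (altLoop d1 d0 rest).1,
          y ≤ (altLoop d1 d0 rest).2 := by
        intro y hy
        have hy' : y ∈ (altLoop d1 d0 rest).2 ::ₘ low2 := by
          rw [← herase]; exact Multiset.mem_coe.mpr hy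
        rcases Multiset.mem_cons.mp hy' with h | h
        · omega
        · exact hlow2 y h
      have hmin1 : PySem.List.min? ((d0 :: d1 :: rest).map (fun x => -x)) (fun x => x)
          = some (-(altLoop d1 d0 rest).1) := by
        rw [min?_map_neg, max?_val _ _ hBmem hBmax]; rfl
      have hmin2 : PySem.List.min? (((d0 :: d1 :: rest).map (fun x => -x)).erase (-(altLoop d1 d0 rest).1)) (fun x => x)
          = some (-(altLoop d1 d0 rest).2) := by
        rw [show ((d0 :: d1 :: rest).map (fun x => -x)).erase (-(altLoop d1 d0 rest).1)
              = ((d0 :: d1 :: rest).erase (altLoop d1 d0 rest).1).map (fun x => -x) from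
            (List.map_erase (fun a b h => by omega) _).symm]
        rw [min?_map_neg, max?_val _ _ hSmem hSmax]; rfl
      rw [hmin1]
      simp only [neg_neg, hmin2]
      simp only [PySem.Int.floordiv_eq_ediv_of_pos (show (0:Int) < 2 by norm_num)]
      have hd : (altLoop d1 d0 rest).1 / 2 ≤ (altLoop d1 d0 rest).1 - (altLoop d1 d0 rest).1 / 2 := by
        omega
      simp only [max_def]
      split_ifs <;> omega
    · simp only [if_neg hc]
      obtain ⟨low2, heq, hle, hlow2⟩ := altLoop_spec rest d0 d1 0 (by omega) (by simp)
      rw [Multiset.zero_add] at heq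
      have hperm : ((d0 :: d1 :: rest : List Int) : Multiset Int)
          = (altLoop d0 d1 rest).1 ::ₘ (altLoop d0 d1 rest).2 ::ₘ low2 := by
        rw [← heq]
        simp only [Multiset.cons_coe]
      have hBmem : (altLoop d0 d1 rest).1 ∈ (d0 :: d1 :: rest : List Int) := by
        rw [← Multiset.mem_coe, hperm]; exact Multiset.mem_cons_self _ _
      have hBmax : ∀ y ∈ (d0 :: d1 :: rest : List Int), y ≤ (altLoop d0 d1 rest).1 := by
        intro y hy
        have hy' : y ∈ (altLoop d0 d1 rest).1 ::ₘ (altLoop d0 d1 rest).2 ::ₘ low2 := by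
          rw [← hperm]; exact Multiset.mem_coe.mpr hy
        rcases Multiset.mem_cons.mp hy' with h | h
        · omega
        · rcases Multiset.mem_cons.mp h with h | h
          · omega
          · exact le_trans (hlow2 y h) hle
      have herase : (((d0 :: d1 :: rest : List Int).erase (altLoop d0 d1 rest).1 : List Int) : Multiset Int)
          = (altLoop d0 d1 rest).2 ::ₘ low2 := by
        rw [← Multiset.coe_erase, hperm, Multiset.erase_cons_head]
      have hSmem : (altLoop d0 d1 rest).2 ∈ (d0 :: d1 :: rest : List Int).erase (altLoop d0 d1 rest).1 := by
        rw [← Multiset.mem_coe, herase]; exact Multiset.mem_cons_self _ _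
      have hSmax : ∀ y ∈ (d0 :: d1 :: rest : List Int).erase (altLoop d0 d1 rest).1,
          y ≤ (altLoop d0 d1 rest).2 := by
        intro y hy
        have hy' : y ∈ (altLoop d0 d1 rest).2 ::ₘ low2 := by
          rw [← herase]; exact Multiset.mem_coe.mpr hy
        rcases Multiset.mem_cons.mp hy' with h | h
        · omega
        · exact hlow2 y h
      have hmin1 : PySem.List.min? ((d0 :: d1 :: rest).map (fun x => -x)) (fun x => x)
          = some (-(altLoop d0 d1 rest).1) := by
        rw [min?_map_neg, max?_val _ _ hBmem hBmax]; rfl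
      have hmin2 : PySem.List.min? (((d0 :: d1 :: rest).map (fun x => -x)).erase (-(altLoop d0 d1 rest).1)) (fun x => x)
          = some (-(altLoop d0 d1 rest).2) := by
        rw [show ((d0 :: d1 :: rest).map (fun x => -x)).erase (-(altLoop d0 d1 rest).1)
              = ((d0 :: d1 :: rest).erase (altLoop d0 d1 rest).1).map (fun x => -x) from
            (List.map_erase (fun a b h => by omega) _).symm]
        rw [min?_map_neg, max?_val _ _ hSmem hSmax]; rfl
      rw [hmin1]
      simp only [neg_neg, hmin2]
      simp only [PySem.Int.floordiv_eq_ediv_of_pos (show (0:Int) < 2 by norm_num)]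
      have hd : (altLoop d0 d1 rest).1 / 2 ≤ (altLoop d0 d1 rest).1 - (altLoop d0 d1 rest).1 / 2 := by
        omega
      simp only [max_def]
      split_ifs <;> omega
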